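-- pv_equiv track=rewrite | github.com/bhaveshchandrajha/scania-pipeline | fix_compile_errors.py | extract_error_blocks
-- ===== SOURCE A (Python) =====
-- from typing import Dict, List, Tuple, Set
--
-- def extract_error_blocks(build_log: str) -> str:
--     """
--     Extract the LAST (most recent) compilation error block from a Maven build log.
--     When the log contains multiple build attempts, only the most recent errors matter.
--     """
--     lines = build_log.splitlines()
--     blocks: List[List[str]] = []
--     current: List[str] = []
--     for line in lines:
--         if "COMPILATION ERROR" in line:
--             if current:
--                 blocks.append(current)
--             current = [line]
--             continue
--         if current:
--             current.append(line)
--     if current: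
--         blocks.append(current)
--     # Use the last block (most recent build's errors)
--     collected = blocks[-1] if blocks else lines
--     if not collected:
--         collected = lines
--     text = "\n".join(collected)
--     return text[-25000:]  # Keep full recent errors
-- ===== SOURCE B (Python) =====
-- def extract_error_blocks(build_log: str) -> str:
--     """Extract the LAST compilation error block from a Maven build log."""
--     lines = build_log.splitlines()
--     collected = lines
--     for i in range(len(lines) - 1, -1, -1):
--         if "COMPILATION ERROR" in lines[i]:
--             collected = lines[i:]
--             break
--     return "\n".join(collected)[-25000:]
-- ===== Notes on version B (the rewrite author's own statement) =====
-- stated objective: simpler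
-- what changed: Replaced A's block-accumulator loop (list of blocks plus a current buffer, taking blocks[-1] at the end) by a reverse scan that finds the last 'COMPILATION ERROR' line and slices the log from there, falling back to the whole line list when no marker exists.
import Mathlib
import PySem

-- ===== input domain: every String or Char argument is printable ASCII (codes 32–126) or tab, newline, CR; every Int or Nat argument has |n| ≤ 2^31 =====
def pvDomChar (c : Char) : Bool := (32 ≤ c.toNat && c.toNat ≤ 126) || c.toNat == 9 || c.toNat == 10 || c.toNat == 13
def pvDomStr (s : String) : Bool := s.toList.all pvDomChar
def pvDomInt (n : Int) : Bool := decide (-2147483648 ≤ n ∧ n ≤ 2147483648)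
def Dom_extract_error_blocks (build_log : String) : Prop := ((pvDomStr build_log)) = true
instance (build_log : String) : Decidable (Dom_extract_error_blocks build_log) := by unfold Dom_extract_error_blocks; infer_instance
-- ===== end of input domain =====

-- B replaces A's block accumulator by a reverse scan for the last marker line and a single
-- slice from there; equal return value on every input (simpler decomposition).

-- ===== PORT A =====
-- loop body of A: markers start a new current block, other lines extend a nonempty current
def eebStep (s : List (List String) × List String) (line : String) :
    List (List String) × List String :=
  if PySem.Str.isIn "COMPILATION ERROR" line then
    (if s.2 ≠ [] then s.1 ++ [s.2] else s.1, [line])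
  else if s.2 ≠ [] then (s.1, s.2 ++ [line]) else s

def extract_error_blocks (build_log : String) : String :=
  let lines := PySem.Str.splitlines build_log
  let st := lines.foldl eebStep ([], [])
  let blocks := if st.2 ≠ [] then st.1 ++ [st.2] else st.1
  let collected := match blocks.getLast? with
    | some b => b          -- blocks[-1] if blocks
    | none => lines        -- else lines
  let collected := if collected = [] then lines else collected
  PySem.Str.slice (PySem.Str.join "\n" collected) (some (-25000)) none

-- ===== PORT B =====
-- reverse scan: for i in range(len(lines)-1, -1, -1), first marker hit gives lines[i:]
def eebLastFrom (lines : List String) : Nat → List String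
  | 0 => lines
  | i + 1 =>
    if PySem.Str.isIn "COMPILATION ERROR" (lines.getD i "") then lines.drop i
    else eebLastFrom lines i

def extract_error_blocks_alt (build_log : String) : String :=
  let lines := PySem.Str.splitlines build_log
  let collected := eebLastFrom lines lines.length
  PySem.Str.slice (PySem.Str.join "\n" collected) (some (-25000)) none

-- ===== PRECONDITION & SPEC =====
def Spec_extract_error_blocks (build_log : String) (out : String) : Prop := out = extract_error_blocks_alt build_log
instance (build_log : String) (out : String) : Decidable (Spec_extract_error_blocks build_log out) := by unfold Spec_extract_error_blocks; infer_instance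

-- ===== CLAIM (what is proved, stated in full; the proofs are below) =====
def Claim_equal_extract_error_blocks : Prop := ∀ (build_log : String), Dom_extract_error_blocks build_log → Spec_extract_error_blocks build_log (extract_error_blocks build_log)

-- ===== LEMMAS AND PROOFS =====

-- the suffix of l from the last marker line, or l itself if there is none:
-- A's loop leaves it in the 'current' component, B finds it by the reverse scan
def eebTail (l : List String) : List String :=
  if (l.foldl eebStep ([], [])).2 = [] then l else (l.foldl eebStep ([], [])).2

-- A's invariant: current is empty only while no marker has been seen, and then blocks is empty too
lemma eeb_inv (l : List String) :
    (l.foldl eebStep ([], [])).2 = [] → (l.foldl eebStep ([], [])).1 = [] := by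
  induction l using List.reverseRecOn with
  | nil => simp
  | append_singleton l x ih =>
    simp only [List.foldl_append, List.foldl_cons, List.foldl_nil, eebStep]
    split_ifs with h1 h2 h2 <;> simp_all

-- A's returned 'collected' is eebTail
lemma eeb_A_collected (l : List String) :
    (let st := l.foldl eebStep ([], []);
     let blocks := if st.2 ≠ [] then st.1 ++ [st.2] else st.1;
     let collected := match blocks.getLast? with
       | some b => b
       | none => l;
     if collected = [] then l else collected) = eebTail l := by
  simp only [eebTail]
  by_cases h : (l.foldl eebStep ([], [])).2 = []
  · simp [h, eeb_inv l h]
  · simp [h]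

-- appending a non-marker line commutes with the reverse scan below it
lemma eeb_lastFrom_append (l : List String) (x : String) (i : Nat) (hi : i ≤ l.length) :
    eebLastFrom (l ++ [x]) i = eebLastFrom l i ++ [x] := by
  induction i with
  | zero => simp [eebLastFrom]
  | succ i ih =>
    have hlt : i < l.length := by omega
    have hg : (l ++ [x]).getD i "" = l.getD i "" := by
      simp [List.getD, List.getElem?_append_left hlt]
    have hd : (l ++ [x]).drop i = l.drop i ++ [x] := by
      rw [List.drop_append_of_le_length (by omega)]
    simp only [eebLastFrom, hg, hd, ih (by omega)]
    split_ifs <;> rfl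

-- B's reverse scan also computes eebTail
lemma eeb_B_collected (l : List String) : eebLastFrom l l.length = eebTail l := by
  induction l using List.reverseRecOn with
  | nil => simp [eebLastFrom, eebTail]
  | append_singleton l x ih =>
    have hlen : (l ++ [x]).length = l.length + 1 := by simp
    rw [hlen]
    simp only [eebLastFrom]
    have hg : (l ++ [x]).getD l.length "" = x := by
      simp [List.getD]
    have hd : (l ++ [x]).drop l.length = [x] := by
      simp
    rw [hg, hd]
    simp only [eebTail, List.foldl_append, List.foldl_cons, List.foldl_nil, eebStep]
    by_cases hm : PySem.Str.isIn "COMPILATION ERROR" x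
    · rw [if_pos hm, if_pos hm]
      simp
    · rw [if_neg hm, eeb_lastFrom_append l x l.length le_rfl, ih]
      simp only [eebTail, if_neg hm]
      by_cases h2 : (l.foldl eebStep ([], [])).2 = []
      · simp [h2]
      · simp [h2]

-- ===== VERDICT (by name: the statement is the Claim_ definition above) =====
theorem extract_error_blocks_spec : Claim_equal_extract_error_blocks := by
  intro build_log _
  show extract_error_blocks build_log = extract_error_blocks_alt build_log
  have h := (eeb_A_collected (PySem.Str.splitlines build_log)).trans
    (eeb_B_collected (PySem.Str.splitlines build_log)).symm
  exact congrArg (fun c => PySem.Str.slice (PySem.Str.join "\n" c) (some (-25000)) none) h
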